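-- pv_equiv track=rewrite | github.com/kameokashinichi/weatherAPI | WTH_data_check.py | generateYearList
-- ===== SOURCE A (Python) =====
-- def generateYearList(uruu=None):
--     date = []
--     for i in range(1, 13):
--         if i == 2:
--             if uruu == None:
--                 for j in range(1, 29):
--                     a = repr(i) + '/' + repr(j)
--                     date.append(a)
--             else:
--                 for j in range(1, 30):
--                     a = repr(i) + '/' + repr(j)
--                     date.append(a)
--         elif i == 4 or i == 6 or i == 9 or i == 11:
--             for j in range(1, 31):
--                 a = repr(i) + '/' + repr(j)
--                 date.append(a)
--         else:
--             for j in range(1, 32):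
--                 a = repr(i) + '/' + repr(j)
--                 date.append(a)
--     return date
-- ===== SOURCE B (Python) =====
-- def generateYearList(uruu=None):
--     # Flat day-of-year traversal: cumulative month offsets, one loop over all days,
--     # converting each day-of-year back to a month/day pair by a linear month search.
--     feb = 28 if uruu == None else 29
--     cum = [0]
--     for n in (31, feb, 31, 30, 31, 30, 31, 31, 30, 31, 30, 31):
--         cum.append(cum[-1] + n)
--     date = []
--     for d in range(cum[12]):
--         m = 1
--         while cum[m] <= d:
--             m += 1
--         date.append(repr(m) + '/' + repr(d - cum[m - 1] + 1))
--     return date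
-- ===== Notes on version B (the rewrite author's own statement) =====
-- stated objective: alternative
-- what changed: Replaces A's per-month if/elif branches with nested per-month day loops by a single flat loop over all days of the year that recovers month/day from a cumulative-offset table.
import Mathlib
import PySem

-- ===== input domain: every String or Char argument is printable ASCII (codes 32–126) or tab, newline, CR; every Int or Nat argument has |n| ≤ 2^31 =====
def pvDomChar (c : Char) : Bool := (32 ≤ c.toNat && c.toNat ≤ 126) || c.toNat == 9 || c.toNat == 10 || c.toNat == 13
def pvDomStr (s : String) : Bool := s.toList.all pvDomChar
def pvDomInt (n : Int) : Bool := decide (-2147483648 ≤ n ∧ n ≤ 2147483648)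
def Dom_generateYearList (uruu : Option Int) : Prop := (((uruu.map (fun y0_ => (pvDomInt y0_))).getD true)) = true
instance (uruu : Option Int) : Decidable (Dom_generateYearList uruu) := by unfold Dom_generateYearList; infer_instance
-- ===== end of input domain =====

-- B replaces A's per-month nested loops with one flat loop over the days of the year,
-- recovering month/day from a cumulative-offset table (alternative decomposition, same cost).

-- ===== PORT A =====
def generateYearList (uruu : Option Int) : List String :=
  (PySem.List.pyRange 1 13 1).foldl (fun date i =>
    if i == 2 then
      if uruu == none then
        (PySem.List.pyRange 1 29 1).foldl (fun date j =>
          date ++ [PySem.Int.toStr i ++ "/" ++ PySem.Int.toStr j]) date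
      else
        (PySem.List.pyRange 1 30 1).foldl (fun date j =>
          date ++ [PySem.Int.toStr i ++ "/" ++ PySem.Int.toStr j]) date
    else if i == 4 || i == 6 || i == 9 || i == 11 then
      (PySem.List.pyRange 1 31 1).foldl (fun date j =>
        date ++ [PySem.Int.toStr i ++ "/" ++ PySem.Int.toStr j]) date
    else
      (PySem.List.pyRange 1 32 1).foldl (fun date j =>
        date ++ [PySem.Int.toStr i ++ "/" ++ PySem.Int.toStr j]) date) []

-- ===== PORT B =====
-- while cum[m] <= d: m += 1   — ported with fuel (the loop runs at most 12 steps in Python);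
-- cum[m] is always in range in Python, so .getD 0 is never the default.
def gylFindM (cum : List Int) (d : Int) : Nat → Int → Int
  | 0, m => m
  | fuel + 1, m =>
      if ((PySem.List.pyGet? cum m).getD 0) ≤ d then gylFindM cum d fuel (m + 1) else m

def generateYearList_alt (uruu : Option Int) : List String :=
  let feb : Int := if uruu == none then 28 else 29
  let cum : List Int :=
    ([31, feb, 31, 30, 31, 30, 31, 31, 30, 31, 30, 31] : List Int).foldl
      (fun cum n => cum ++ [((PySem.List.pyGet? cum (-1)).getD 0) + n]) [0]
  (PySem.List.pyRange 0 ((PySem.List.pyGet? cum 12).getD 0) 1).foldl (fun date d =>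
    let m := gylFindM cum d 13 1
    date ++ [PySem.Int.toStr m ++ "/" ++
      PySem.Int.toStr (d - ((PySem.List.pyGet? cum (m - 1)).getD 0) + 1)]) []

-- ===== PRECONDITION & SPEC =====
def Spec_generateYearList (uruu : Option Int) (out : List String) : Prop := out = generateYearList_alt uruu
instance (uruu : Option Int) (out : List String) : Decidable (Spec_generateYearList uruu out) := by unfold Spec_generateYearList; infer_instance

-- ===== CLAIM (what is proved, stated in full; the proofs are below) =====
def Claim_equal_generateYearList : Prop := ∀ (uruu : Option Int), Dom_generateYearList uruu → Spec_generateYearList uruu (generateYearList uruu)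

-- ===== LEMMAS AND PROOFS =====

-- ===== VERDICT (by name: the statement is the Claim_ definition above) =====
set_option maxRecDepth 4096 in
theorem generateYearList_spec : Claim_equal_generateYearList := by
  intro uruu _
  unfold Spec_generateYearList
  cases uruu with
  | none => decide
  | some v =>
      have h : ((some v : Option Int) == none) = false := rfl
      simp only [generateYearList, generateYearList_alt, h]
      decide
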